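-- pv_equiv track=rewrite | github.com/sinamajidian/Hap10 | old/frag_v4.py | extract_cc_id
-- ===== SOURCE A (Python) =====
-- def extract_cc_id(list_fragment_pos):
--
--     """ extract connected componenets
--
--     input:  A list of lists. Inner list contains the SNP indices of all alleles in the all segments in one fragment (line of fragment matrix)
--     output: A list of lists. Inner list contains the line number of fragment in the fragment file for each cc  [[2], [6], [7, 5, 4, 3, 1, 0]]
--
--     """
--
--     list_cc_fragpos=[]
--     list_cc_fragid=[]
--     for fragid_k, list_fragment_pos_k in enumerate(list_fragment_pos): # the fragment are sorted in the list
--         # fragid_k the 0-based index of this fragment in the fragment file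
--         indices = set(list_fragment_pos_k)
--
--         cc_id_overlapped_list=[]
--         for cc_id, cc in enumerate(list_cc_fragpos):    # finding the index of cc that are overlapped with the new fragment
--             intersction = indices & cc
--             if len(intersction):
--                 cc_id_overlapped_list.append(cc_id)
--
--         cc_fragpos_new=indices                           # new_cc initialized with the indices of the new fragment
--         cc_fragid_new=[fragid_k]
--         for cc_id in cc_id_overlapped_list:             # adding those cc that are overlapped with the fragment to the new cc
--             cc_fragpos_new |= list_cc_fragpos[cc_id]
--             cc_fragid_new  += list_cc_fragid[cc_id]
--
--         for cc_id in sorted(cc_id_overlapped_list, reverse=True):      # removing those cc that are overlapped from the list_cc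
--             del list_cc_fragpos[cc_id]
--             del list_cc_fragid[cc_id]
--
--         list_cc_fragpos.append(cc_fragpos_new)
--         list_cc_fragid.append(cc_fragid_new)
--
--     return list_cc_fragid
-- ===== SOURCE B (Python) =====
-- def extract_cc_id(list_fragment_pos):
--     """Connected components of fragments sharing SNP indices, found via a
--     SNP -> component index instead of scanning every existing component per fragment."""
--     comps = {}      # component key (creation fragid) -> (snp set, fragid list)
--     snp2cc = {}     # SNP index -> key of the component currently containing it
--     for fragid, positions in enumerate(list_fragment_pos):
--         indices = set(positions)
--         roots = sorted({snp2cc[p] for p in indices if p in snp2cc})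
--         snps = set(indices)
--         fragids = [fragid]
--         for r in roots:
--             s, f = comps.pop(r)
--             snps |= s
--             fragids += f
--         for p in snps:
--             snp2cc[p] = fragid
--         comps[fragid] = (snps, fragids)
--     return [f for (_, f) in comps.values()]
-- ===== Notes on version B (the rewrite author's own statement) =====
-- stated objective: alternative
-- what changed: Instead of intersecting every fragment with every existing component (A's inner scan over all live components), B keeps a dict from SNP index to the key of the component currently containing it, looks up only the components the fragment actually touches, merges them and relabels the merged SNPs.
import Mathlib
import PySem

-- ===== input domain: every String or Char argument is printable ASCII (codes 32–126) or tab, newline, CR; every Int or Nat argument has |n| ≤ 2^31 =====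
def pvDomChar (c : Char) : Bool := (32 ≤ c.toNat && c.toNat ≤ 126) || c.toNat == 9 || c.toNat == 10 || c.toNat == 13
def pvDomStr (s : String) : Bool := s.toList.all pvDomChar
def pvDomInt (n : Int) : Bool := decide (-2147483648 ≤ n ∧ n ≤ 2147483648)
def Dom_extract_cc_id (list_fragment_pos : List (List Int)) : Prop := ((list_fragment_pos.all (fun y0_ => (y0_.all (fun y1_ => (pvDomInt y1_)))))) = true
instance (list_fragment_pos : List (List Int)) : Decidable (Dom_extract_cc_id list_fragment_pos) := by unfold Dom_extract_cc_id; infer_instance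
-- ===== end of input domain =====

-- B replaces A's per-fragment scan over every existing component by a SNP -> component
-- index (dict), merging only the components actually hit (objective: alternative algorithm).

-- ===== PORT A =====
-- `del l[i]` (exact here: A only deletes indices produced by enumerate, always in range)
def pvDel {α : Type} (l : List α) (i : Int) : List α :=
  ((PySem.List.pop? l i).map (fun q => q.2)).getD l

-- loop body of A's `for fragid_k, list_fragment_pos_k in enumerate(list_fragment_pos)`
def pvStepA (st : List (PySem.Set Int) × List (List Int)) (e : Int × List Int) :
    List (PySem.Set Int) × List (List Int) :=
  let indices : PySem.Set Int := PySem.Set.ofList e.2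
  let cc_id_overlapped_list : List Int :=
    (PySem.List.enumerate st.1).foldl
      (fun acc c => if PySem.Set.len (PySem.Set.inter indices c.2) ≠ 0 then acc ++ [c.1] else acc) []
  let merged : PySem.Set Int × List Int :=
    cc_id_overlapped_list.foldl
      (fun m cc_id =>
        (PySem.Set.union m.1 ((PySem.List.pyGet? st.1 cc_id).getD PySem.Set.empty),
         m.2 ++ (PySem.List.pyGet? st.2 cc_id).getD []))
      (indices, [e.1])
  let rem : List (PySem.Set Int) × List (List Int) :=
    (PySem.List.sorted cc_id_overlapped_list (fun x => x) true).foldl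
      (fun r cc_id => (pvDel r.1 cc_id, pvDel r.2 cc_id)) (st.1, st.2)
  (rem.1 ++ [merged.1], rem.2 ++ [merged.2])

def extract_cc_id (list_fragment_pos : List (List Int)) : List (List Int) :=
  ((PySem.List.enumerate list_fragment_pos).foldl pvStepA ([], [])).2

-- ===== PORT B =====
-- loop body of B's `for fragid, positions in enumerate(list_fragment_pos)`
def pvStepB (st : PySem.Dict Int (PySem.Set Int × List Int) × PySem.Dict Int Int)
    (e : Int × List Int) :
    PySem.Dict Int (PySem.Set Int × List Int) × PySem.Dict Int Int :=
  let indices : PySem.Set Int := PySem.Set.ofList e.2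
  let roots : List Int :=
    PySem.List.sorted (PySem.Set.ofList (indices.filterMap (fun p => st.2.get? p))) (fun x => x) false
  -- `for r in roots: s, f = comps.pop(r); snps |= s; fragids += f`
  let m := roots.foldl
      (fun (acc : PySem.Dict Int (PySem.Set Int × List Int) × PySem.Set Int × List Int) r =>
        let sf := (acc.1.get? r).getD (PySem.Set.empty, [])
        (acc.1.erase r, PySem.Set.union acc.2.1 sf.1, acc.2.2 ++ sf.2))
      (st.1, indices, [e.1])
  let snp2cc := m.2.1.foldl (fun d p => d.insert p e.1) st.2
  (m.1.insert e.1 m.2, snp2cc)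

def extract_cc_id_alt (list_fragment_pos : List (List Int)) : List (List Int) :=
  ((((PySem.List.enumerate list_fragment_pos).foldl pvStepB
      (PySem.Dict.empty, PySem.Dict.empty)).1).values).map (fun sf => sf.2)

-- ===== PRECONDITION & SPEC =====
def Spec_extract_cc_id (list_fragment_pos : List (List Int)) (out : List (List Int)) : Prop := out = extract_cc_id_alt list_fragment_pos
instance (list_fragment_pos : List (List Int)) (out : List (List Int)) : Decidable (Spec_extract_cc_id list_fragment_pos out) := by unfold Spec_extract_cc_id; infer_instance

-- ===== CLAIM (what is proved, stated in full; the proofs are below) =====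
def Claim_equal_extract_cc_id : Prop := ∀ (list_fragment_pos : List (List Int)), Dom_extract_cc_id list_fragment_pos → Spec_extract_cc_id list_fragment_pos (extract_cc_id list_fragment_pos)

-- ===== LEMMAS AND PROOFS =====

-- the simulation invariant: B's dict of components carries exactly A's two lists
-- (in the same order), its keys are strictly increasing and below the fragment
-- counter, and the SNP index maps p to k iff k's component set contains p
def pvInv (n : Int) (a : List (PySem.Set Int) × List (List Int))
    (b : PySem.Dict Int (PySem.Set Int × List Int) × PySem.Dict Int Int) : Prop :=
  a.1 = b.1.items.map (fun e => e.2.1) ∧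
  a.2 = b.1.items.map (fun e => e.2.2) ∧
  List.Pairwise (fun e f => e.1 < f.1) b.1.items ∧
  (∀ e ∈ b.1.items, e.1 < n) ∧
  (∀ p k, b.2.get? p = some k ↔ ∃ e ∈ b.1.items, e.1 = k ∧ p ∈ e.2.1)

-- ---- enumerate facts ----
lemma pvEnum_cons {α : Type} (x : α) (t : List α) (s : Int) :
    PySem.List.enumerate (x :: t) s = (s, x) :: PySem.List.enumerate t (s + 1) := rfl

lemma pvEnum_map {α β : Type} (g : α → β) (l : List α) (s : Int) :
    PySem.List.enumerate (l.map g) s = (PySem.List.enumerate l s).map (fun e => (e.1, g e.2)) := by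
  induction l generalizing s with
  | nil => rfl
  | cons x t ih => simp [ih]

lemma pvEnum_map_snd {α : Type} (l : List α) (s : Int) :
    (PySem.List.enumerate l s).map (fun e => e.2) = l := by
  induction l generalizing s with
  | nil => rfl
  | cons x t ih => simp [ih]

lemma pvPyGet_succ {α : Type} (x : α) (t : List α) (j : Int) (hj : 0 ≤ j) :
    PySem.List.pyGet? (x :: t) (j + 1) = PySem.List.pyGet? t j := by
  simp only [PySem.List.pyGet?, PySem.List.pyIdx?, List.length_cons]
  split_ifs with h1 h2 h3 h4 <;> try omega
  · have : (j+1).toNat = j.toNat + 1 := by omega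
    simp [this]
  · rfl

lemma pvMem_enum {α : Type} (l : List α) (s : Int) (e : Int × α) (he : e ∈ PySem.List.enumerate l s) :
    s ≤ e.1 ∧ PySem.List.pyGet? l (e.1 - s) = some e.2 := by
  induction l generalizing s with
  | nil => simp [PySem.List.enumerate] at he
  | cons x t ih =>
      rw [pvEnum_cons] at he
      rcases List.mem_cons.mp he with h | h
      · subst h; simp
      · obtain ⟨h1, h2⟩ := ih (s+1) h
        refine ⟨by omega, ?_⟩
        have : e.1 - s = (e.1 - (s+1)) + 1 := by ring
        rw [this, pvPyGet_succ x t _ (by omega)]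
        exact h2

lemma pvEnum_pairwise {α : Type} (l : List α) (s : Int) :
    List.Pairwise (fun e f => e.1 < f.1) (PySem.List.enumerate l s) := by
  induction l generalizing s with
  | nil => simp [PySem.List.enumerate]
  | cons x t ih =>
      rw [pvEnum_cons, List.pairwise_cons]
      exact ⟨fun f hf => by have := (pvMem_enum t (s+1) f hf).1; simp; omega, ih (s+1)⟩

-- ---- sorted facts ----
lemma pvSorted_rev_eq (xs ys : List Int) (h : ys.Perm xs)
    (hp : List.Pairwise (fun a b => b < a) ys) :
    PySem.List.sorted xs (fun x => x) true = ys := by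
  have key : PySem.List.sorted xs (fun x : Int => x) true
      = PySem.List.sorted xs (fun x : Int => -x) false := by
    simp only [PySem.List.sorted]
    congr 1
    funext a b
    simp
  rw [key]
  exact PySem.List.sorted_eq_of_perm_of_pairwise_lt xs ys (fun x => -x) h
    (hp.imp (fun hab => by dsimp only; omega))

-- ---- pvDel facts ----
lemma pvDel_zero {α : Type} (x : α) (t : List α) : pvDel (x :: t) 0 = t := by
  simp [pvDel, PySem.List.pop?, PySem.List.pyIdx?]

lemma pvDel_succ {α : Type} (x : α) (t : List α) (j : Int) (hj : 0 ≤ j) :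
    pvDel (x :: t) (j + 1) = x :: pvDel t j := by
  simp only [pvDel, PySem.List.pop?, PySem.List.pyIdx?, List.length_cons]
  split_ifs with h1 h2 h3 h4 <;> try omega
  · have h5 : (j+1).toNat = j.toNat + 1 := by omega
    have h6 : j.toNat < t.length := by omega
    simp [h5, List.getElem?_eq_getElem h6, List.eraseIdx_cons_succ]
  · rfl

lemma pvFoldr_del_shift {α : Type} (ids : List Int) (s : Int) (x : α) (l : List α)
    (hge : ∀ i ∈ ids, s + 1 ≤ i) :
    ids.foldr (fun i acc => pvDel acc (i - s)) (x :: l)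
      = x :: ids.foldr (fun i acc => pvDel acc (i - (s+1))) l := by
  induction ids with
  | nil => rfl
  | cons i t ih =>
      simp only [List.foldr_cons]
      rw [ih (fun j hj => hge j (List.mem_cons_of_mem i hj))]
      have h1 : i - s = (i - (s+1)) + 1 := by ring
      rw [h1, pvDel_succ x _ _ (by have := hge i List.mem_cons_self; omega)]

-- folding `del` from the back over the (ascending) selected positions keeps
-- exactly the unselected elements
lemma pvDelfold {β α : Type} (its : List β) (q : β → Bool) (g : β → α) :
    ∀ (s : Int),
    ((((PySem.List.enumerate its s).filter (fun c => q c.2)).map (fun c => c.1)).foldr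
        (fun i acc => pvDel acc (i - s)) (its.map g)) =
      (its.filter (fun e => !q e)).map g := by
  induction its with
  | nil => intro s; rfl
  | cons b t ih =>
      intro s
      have hge : ∀ i ∈ (((PySem.List.enumerate t (s+1)).filter (fun c => q c.2)).map (fun c => c.1)),
          s + 1 ≤ i := by
        intro i hi
        obtain ⟨c, hc, rfl⟩ := List.mem_map.mp hi
        exact (pvMem_enum t (s+1) c (List.mem_of_mem_filter hc)).1
      rw [pvEnum_cons]
      by_cases hqb : q b = true
      · have hf : List.filter (fun c => q c.2) ((s, b) :: PySem.List.enumerate t (s+1))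
            = (s, b) :: List.filter (fun c => q c.2) (PySem.List.enumerate t (s+1)) := by
          simp [hqb]
        rw [hf]
        simp only [List.map_cons, List.foldr_cons]
        rw [pvFoldr_del_shift _ s (g b) (t.map g) hge, ih (s+1)]
        simp [hqb, pvDel_zero]
      · have hqb' : q b = false := by simpa using hqb
        have hf : List.filter (fun c => q c.2) ((s, b) :: PySem.List.enumerate t (s+1))
            = List.filter (fun c => q c.2) (PySem.List.enumerate t (s+1)) := by
          simp [hqb']
        rw [hf, List.map_cons]
        rw [pvFoldr_del_shift _ s (g b) (t.map g) hge, ih (s+1)]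
        simp [hqb']

-- ---- dict facts ----
lemma pvGet?_erase_of_ne {ν : Type} (d : PySem.Dict Int ν) (k k' : Int) (h : k' ≠ k) :
    (d.erase k).get? k' = d.get? k' := by
  obtain ⟨l⟩ := d
  induction l with
  | nil => rfl
  | cons p rest ih =>
      obtain ⟨pk, pv⟩ := p
      by_cases hp : pk = k
      · subst hp
        have hc : (pk == k') = false := by simp; omega
        simp [PySem.Dict.erase, PySem.Dict.get?_mk_cons, hc] at ih ⊢
        convert ih using 2
      · have hpk : (!(pk == k)) = true := by simpa using hp
        simp only [PySem.Dict.erase, List.filter_cons, hpk, if_pos] at ih ⊢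
        rw [PySem.Dict.get?_mk_cons, PySem.Dict.get?_mk_cons]
        split_ifs
        · rfl
        · exact ih

lemma pvGet?_foldl_insert_const {ν : Type} (l : List Int) (d : PySem.Dict Int ν) (v : ν) (x : Int) :
    (l.foldl (fun d p => d.insert p v) d).get? x = if x ∈ l then some v else d.get? x := by
  induction l generalizing d with
  | nil => simp
  | cons a t ih =>
      simp only [List.foldl_cons, ih, List.mem_cons]
      by_cases hx : x ∈ t
      · simp [hx]
      · by_cases hxa : x = a
        · simp [hxa, PySem.Dict.get?_insert_self]
        · simp [hx, hxa, PySem.Dict.get?_insert]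

lemma pvItems_foldl_erase {ν : Type} (K : List (Int × ν)) (d : PySem.Dict Int ν) :
    (K.foldl (fun c e => c.erase e.1) d).items
      = d.items.filter (fun p => !(K.map (fun e => e.1)).contains p.1) := by
  induction K generalizing d with
  | nil => simp
  | cons a t ih =>
      rw [List.foldl_cons, ih]
      simp only [PySem.Dict.erase, List.filter_filter, List.map_cons]
      apply List.filter_congr
      intro p _
      simp only [List.contains_cons, Bool.not_or]
      rw [Bool.and_comm]

-- B's pop-and-merge loop, evaluated against a dict that still holds every root
lemma pvBfold (K : List (Int × (PySem.Set Int × List Int)))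
    (C : PySem.Dict Int (PySem.Set Int × List Int))
    (hv : ∀ e ∈ K, C.get? e.1 = some e.2)
    (hnd : (K.map (fun e => e.1)).Nodup)
    (s0 : PySem.Set Int) (f0 : List Int) :
    (K.map (fun e => e.1)).foldl
        (fun (acc : PySem.Dict Int (PySem.Set Int × List Int) × PySem.Set Int × List Int) r =>
          let sf := (acc.1.get? r).getD (PySem.Set.empty, [])
          (acc.1.erase r, PySem.Set.union acc.2.1 sf.1, acc.2.2 ++ sf.2))
        (C, s0, f0)
      = (K.foldl (fun c e => c.erase e.1) C,
         K.foldl (fun s e => PySem.Set.union s e.2.1) s0,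
         K.foldl (fun f e => f ++ e.2.2) f0) := by
  induction K generalizing C s0 f0 with
  | nil => rfl
  | cons a t ih =>
      simp only [List.map_cons, List.foldl_cons]
      rw [hv a List.mem_cons_self]
      simp only [Option.getD_some]
      apply ih
      · intro e he
        rw [pvGet?_erase_of_ne]
        · exact hv e (List.mem_cons_of_mem a he)
        · intro hee
          rw [List.map_cons] at hnd
          exact (List.nodup_cons.mp hnd).1 (hee ▸ List.mem_map_of_mem (f := fun e => e.1) he)
      · rw [List.map_cons] at hnd
        exact (List.nodup_cons.mp hnd).2

lemma pvMem_foldl_union (K : List (Int × (PySem.Set Int × List Int))) (s0 : PySem.Set Int) (x : Int) :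
    x ∈ K.foldl (fun s e => PySem.Set.union s e.2.1) s0 ↔ x ∈ s0 ∨ ∃ e ∈ K, x ∈ e.2.1 := by
  induction K generalizing s0 with
  | nil => simp
  | cons a t ih =>
      rw [List.foldl_cons, ih, PySem.Set.mem_union, List.exists_mem_cons_iff]
      tauto

-- ---- step normal forms ----
-- the fragment selects the components whose SNP set meets its indices
def pvSel (pos : List Int) (e : Int × (PySem.Set Int × List Int)) : Bool :=
  decide (PySem.Set.len (PySem.Set.inter (PySem.Set.ofList pos) e.2.1) ≠ 0)

def pvMS (its : List (Int × (PySem.Set Int × List Int))) (pos : List Int) : PySem.Set Int :=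
  (its.filter (pvSel pos)).foldl (fun s e => PySem.Set.union s e.2.1) (PySem.Set.ofList pos)

def pvMF (its : List (Int × (PySem.Set Int × List Int))) (n : Int) (pos : List Int) : List Int :=
  (its.filter (pvSel pos)).foldl (fun f e => f ++ e.2.2) [n]

lemma pvSel_iff (pos : List Int) (e : Int × (PySem.Set Int × List Int)) :
    pvSel pos e = true ↔ ∃ p ∈ PySem.Set.ofList pos, p ∈ e.2.1 := by
  simp only [pvSel, PySem.Set.len, PySem.Set.inter, decide_eq_true_eq]
  rw [ne_eq, Nat.cast_eq_zero, List.length_eq_zero_iff]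
  simp [List.filter_eq_nil_iff]

lemma pvPyGet_map {α β : Type} (g : α → β) (l : List α) (i : Int) :
    PySem.List.pyGet? (l.map g) i = (PySem.List.pyGet? l i).map g := by
  simp only [PySem.List.pyGet?, List.length_map, Option.map_bind]
  cases PySem.List.pyIdx? l.length i <;> simp

lemma pvStepA_eq (its : List (Int × (PySem.Set Int × List Int))) (n : Int) (pos : List Int) :
    pvStepA (its.map (fun e => e.2.1), its.map (fun e => e.2.2)) (n, pos) =
      ((its.filter (fun e => !pvSel pos e)).map (fun e => e.2.1) ++ [pvMS its pos],
       (its.filter (fun e => !pvSel pos e)).map (fun e => e.2.2) ++ [pvMF its n pos]) := by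
  simp only [pvStepA]
  -- name the pieces
  have hov : (PySem.List.enumerate (its.map (fun e => e.2.1))).foldl
      (fun acc c => if PySem.Set.len (PySem.Set.inter (PySem.Set.ofList pos) c.2) ≠ 0
        then acc ++ [c.1] else acc) []
      = ((PySem.List.enumerate its 0).filter (fun c => pvSel pos c.2)).map (fun c => c.1) := by
    rw [PySem.List.foldl_append_ite
      (p := fun c : Int × PySem.Set Int =>
        PySem.Set.len (PySem.Set.inter (PySem.Set.ofList pos) c.2) ≠ 0)
      (f := fun c => c.1)]
    rw [List.nil_append, pvEnum_map]
    rw [List.filter_map, List.map_map]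
    rfl
  rw [hov]
  have hsnd : ((PySem.List.enumerate its 0).filter (fun c => pvSel pos c.2)).map (fun c => c.2)
      = its.filter (pvSel pos) := by
    have h0 : (fun c : Int × (Int × (PySem.Set Int × List Int)) => pvSel pos c.2)
        = (pvSel pos ∘ fun c : Int × (Int × (PySem.Set Int × List Int)) => c.2) := rfl
    rw [h0, ← List.filter_map, pvEnum_map_snd]
  have hmerged :
      (((PySem.List.enumerate its 0).filter (fun c => pvSel pos c.2)).map (fun c => c.1)).foldl
        (fun (m : PySem.Set Int × List Int) cc_id =>
          (PySem.Set.union m.1 ((PySem.List.pyGet? (its.map (fun e => e.2.1)) cc_id).getD PySem.Set.empty),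
           m.2 ++ (PySem.List.pyGet? (its.map (fun e => e.2.2)) cc_id).getD []))
        (PySem.Set.ofList pos, [n])
      = (pvMS its pos, pvMF its n pos) := by
    rw [List.foldl_map]
    have hcongr := PySem.List.foldl_congr_mem
      (l := (PySem.List.enumerate its 0).filter (fun c => pvSel pos c.2))
      (init := (PySem.Set.ofList pos, ([n] : List Int)))
      (f := fun (m : PySem.Set Int × List Int) (c : Int × (Int × (PySem.Set Int × List Int))) =>
        (PySem.Set.union m.1 ((PySem.List.pyGet? (its.map (fun e => e.2.1)) c.1).getD PySem.Set.empty),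
         m.2 ++ (PySem.List.pyGet? (its.map (fun e => e.2.2)) c.1).getD []))
      (g := fun (m : PySem.Set Int × List Int) (c : Int × (Int × (PySem.Set Int × List Int))) =>
        (PySem.Set.union m.1 c.2.2.1, m.2 ++ c.2.2.2))
      (by
        intro acc c hc
        have hmem := pvMem_enum its 0 c (List.mem_of_mem_filter hc)
        have hg : PySem.List.pyGet? its c.1 = some c.2 := by
          simpa using hmem.2
        dsimp only
        rw [pvPyGet_map, pvPyGet_map, hg]
        rfl)
    rw [hcongr]
    rw [← List.foldl_map (f := fun c : Int × (Int × (PySem.Set Int × List Int)) => c.2)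
      (g := fun (m : PySem.Set Int × List Int) (e : Int × (PySem.Set Int × List Int)) =>
        (PySem.Set.union m.1 e.2.1, m.2 ++ e.2.2))]
    rw [hsnd]
    rw [PySem.List.foldl_prod_mk
      (f := fun (s : PySem.Set Int) (e : Int × (PySem.Set Int × List Int)) => PySem.Set.union s e.2.1)
      (g := fun (f : List Int) (e : Int × (PySem.Set Int × List Int)) => f ++ e.2.2)]
    rfl
  rw [hmerged]
  have hpwids : List.Pairwise (fun a b => a < b)
      (((PySem.List.enumerate its 0).filter (fun c => pvSel pos c.2)).map (fun c => c.1)) := by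
    exact List.Pairwise.map _ (fun a b h => h)
      ((pvEnum_pairwise its 0).sublist List.filter_sublist)
  have hsorted : PySem.List.sorted
      (((PySem.List.enumerate its 0).filter (fun c => pvSel pos c.2)).map (fun c => c.1))
      (fun x => x) true
      = (((PySem.List.enumerate its 0).filter (fun c => pvSel pos c.2)).map (fun c => c.1)).reverse := by
    apply pvSorted_rev_eq
    · exact List.reverse_perm _
    · rw [List.pairwise_reverse]
      exact hpwids
  rw [hsorted]
  rw [PySem.List.foldl_prod_mk (f := fun l i => pvDel l i) (g := fun l i => pvDel l i)]
  rw [List.foldl_reverse, List.foldl_reverse]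
  have hfr : ∀ {γ : Type} (l0 : List γ),
      (((PySem.List.enumerate its 0).filter (fun c => pvSel pos c.2)).map (fun c => c.1)).foldr
        (fun i acc => pvDel acc i) l0
      = (((PySem.List.enumerate its 0).filter (fun c => pvSel pos c.2)).map (fun c => c.1)).foldr
        (fun i acc => pvDel acc (i - 0)) l0 := by
    intro γ l0; congr 1; funext i acc; rw [sub_zero]
  rw [hfr, hfr, pvDelfold its (pvSel pos) (fun e => e.2.1) 0,
    pvDelfold its (pvSel pos) (fun e => e.2.2) 0]

lemma pvStepB_eq (C : PySem.Dict Int (PySem.Set Int × List Int)) (M : PySem.Dict Int Int)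
    (n : Int) (pos : List Int)
    (hpw : List.Pairwise (fun e f => e.1 < f.1) C.items)
    (hbound : ∀ e ∈ C.items, e.1 < n)
    (hchar : ∀ p k, M.get? p = some k ↔ ∃ e ∈ C.items, e.1 = k ∧ p ∈ e.2.1) :
    (pvStepB (C, M) (n, pos)).1.items
        = C.items.filter (fun e => !pvSel pos e) ++ [(n, (pvMS C.items pos, pvMF C.items n pos))]
      ∧ (pvStepB (C, M) (n, pos)).2 = (pvMS C.items pos).foldl (fun d p => d.insert p n) M := by
  have hndk : (C.items.map (fun e => e.1)).Nodup := by
    rw [List.nodup_iff_pairwise_ne]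
    exact List.Pairwise.map _ (fun a b h => ne_of_lt h) hpw
  have huniq : ∀ p q, p ∈ C.items → q ∈ C.items → q.1 = p.1 → q = p := by
    intro p q hp hq he
    have h1 := PySem.Dict.get?_of_mem_items C hp hndk
    have h2 := PySem.Dict.get?_of_mem_items C hq hndk
    rw [he, h1] at h2
    exact Prod.ext he (by injection h2 with h3; exact h3.symm)
  have hK : ∀ e, e ∈ C.items.filter (pvSel pos) ↔ e ∈ C.items ∧ pvSel pos e = true := by
    intro e; simp [List.mem_filter]
  have hndK : ((C.items.filter (pvSel pos)).map (fun e => e.1)).Nodup := by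
    rw [List.nodup_iff_pairwise_ne]
    exact List.Pairwise.map _ (fun a b h => ne_of_lt h) (hpw.sublist List.filter_sublist)
  have hroots : PySem.List.sorted
      (PySem.Set.ofList ((PySem.Set.ofList pos).filterMap (fun p => M.get? p))) (fun x => x) false
      = (C.items.filter (pvSel pos)).map (fun e => e.1) := by
    apply PySem.List.sorted_eq_of_perm_of_pairwise_lt
    · rw [List.perm_ext_iff_of_nodup]
      · intro x
        rw [PySem.Set.mem_ofList, List.mem_filterMap]
        constructor
        · intro hx
          obtain ⟨e, he, rfl⟩ := List.mem_map.mp hx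
          rw [hK] at he
          obtain ⟨p, hp, hpe⟩ := (pvSel_iff pos e).mp he.2
          exact ⟨p, hp, (hchar p e.1).mpr ⟨e, he.1, rfl, hpe⟩⟩
        · rintro ⟨p, hp, hx⟩
          obtain ⟨e, he, rfl, hpe⟩ := (hchar p x).mp hx
          exact List.mem_map_of_mem ((hK e).mpr ⟨he, (pvSel_iff pos e).mpr ⟨p, hp, hpe⟩⟩)
      · exact hndK
      · exact PySem.Set.nodup_ofList _
    · exact List.Pairwise.map _ (fun a b h => h) (hpw.sublist List.filter_sublist)
  have hv : ∀ e ∈ C.items.filter (pvSel pos), C.get? e.1 = some e.2 := by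
    intro e he
    exact PySem.Dict.get?_of_mem_items C (List.mem_of_mem_filter he) hndk
  simp only [pvStepB]
  rw [hroots, pvBfold (C.items.filter (pvSel pos)) C hv hndK]
  have hitems_er : ((C.items.filter (pvSel pos)).foldl (fun c e => c.erase e.1) C).items
      = C.items.filter (fun e => !pvSel pos e) := by
    rw [pvItems_foldl_erase]
    apply List.filter_congr
    intro p hp
    congr 1
    by_cases hsp : pvSel pos p = true
    · have hm : p.1 ∈ (C.items.filter (pvSel pos)).map (fun e => e.1) :=
        List.mem_map_of_mem ((hK p).mpr ⟨hp, hsp⟩)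
      rw [hsp]
      exact List.contains_iff_mem.mpr hm
    · have hsp' : pvSel pos p = false := Bool.eq_false_iff.mpr hsp
      rw [hsp', Bool.eq_false_iff]
      intro hcon
      rw [List.contains_iff_mem] at hcon
      obtain ⟨q, hq, hq1⟩ := List.mem_map.mp hcon
      rw [hK] at hq
      have heq := huniq p q hp hq.1 hq1
      have hq2 := hq.2
      rw [heq, hsp'] at hq2
      exact Bool.false_eq_true.mp hq2
  have hnotc : ((C.items.filter (pvSel pos)).foldl (fun c e => c.erase e.1) C).contains n = false := by
    rw [Bool.eq_false_iff]
    intro hcon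
    rw [PySem.Dict.contains_iff_mem_keys] at hcon
    have : ((C.items.filter (pvSel pos)).foldl (fun c e => c.erase e.1) C).keys
        = (C.items.filter (fun e => !pvSel pos e)).map (fun e => e.1) := by
      rw [PySem.Dict.keys, hitems_er]
    rw [this] at hcon
    obtain ⟨q, hq, hq1⟩ := List.mem_map.mp hcon
    have := hbound q (List.mem_of_mem_filter hq)
    omega
  constructor
  · rw [PySem.Dict.items_insert_of_not_contains _ _ hnotc, hitems_er]
    rfl
  · rfl

-- ---- the step lemma ----
lemma pvStep (n : Int) (pos : List Int) (a : List (PySem.Set Int) × List (List Int))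
    (b : PySem.Dict Int (PySem.Set Int × List Int) × PySem.Dict Int Int)
    (h : pvInv n a b) : pvInv (n + 1) (pvStepA a (n, pos)) (pvStepB b (n, pos)) := by
  obtain ⟨P, F⟩ := a
  obtain ⟨C, M⟩ := b
  obtain ⟨h1, h2, h3, h4, h5⟩ := h
  dsimp only at h1 h2 h3 h4 h5
  subst h1 h2
  have hB := pvStepB_eq C M n pos h3 h4 h5
  have hndk : (C.items.map (fun e => e.1)).Nodup := by
    rw [List.nodup_iff_pairwise_ne]
    exact List.Pairwise.map _ (fun a b h => ne_of_lt h) h3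
  have huniq : ∀ p q, p ∈ C.items → q ∈ C.items → q.1 = p.1 → q = p := by
    intro p q hp hq he
    have ha := PySem.Dict.get?_of_mem_items C hp hndk
    have hb := PySem.Dict.get?_of_mem_items C hq hndk
    rw [he, ha] at hb
    exact Prod.ext he (by injection hb with h3'; exact h3'.symm)
  have hmemS : ∀ x, x ∈ pvMS C.items pos ↔
      x ∈ PySem.Set.ofList pos ∨ ∃ e ∈ C.items.filter (pvSel pos), x ∈ e.2.1 := by
    intro x
    exact pvMem_foldl_union _ _ x
  refine ⟨?_, ?_, ?_, ?_, ?_⟩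
  · rw [pvStepA_eq C.items n pos, hB.1]
    simp [List.map_append]
  · rw [pvStepA_eq C.items n pos, hB.1]
    simp [List.map_append]
  · rw [hB.1]
    rw [List.pairwise_append]
    refine ⟨h3.sublist List.filter_sublist, List.pairwise_singleton _ _, ?_⟩
    intro e he f hf
    have h4e := h4 e (List.mem_of_mem_filter he)
    have : f = (n, (pvMS C.items pos, pvMF C.items n pos)) := by simpa using hf
    rw [this]
    exact h4e
  · rw [hB.1]
    intro e he
    rcases List.mem_append.mp he with hef | hen
    · have := h4 e (List.mem_of_mem_filter hef)
      omega
    · have : e = (n, (pvMS C.items pos, pvMF C.items n pos)) := by simpa using hen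
      rw [this]
      omega
  · intro p k
    rw [hB.2, pvGet?_foldl_insert_const, hB.1]
    by_cases hpm : p ∈ pvMS C.items pos
    · rw [if_pos hpm]
      constructor
      · intro hk
        injection hk with hk
        subst hk
        exact ⟨(n, (pvMS C.items pos, pvMF C.items n pos)),
          List.mem_append_right _ (List.mem_singleton.mpr rfl), rfl, hpm⟩
      · rintro ⟨e, he, rfl, hpe⟩
        rcases List.mem_append.mp he with hef | hen
        · exfalso
          have hnotsel : pvSel pos e = false := by
            simpa using (List.mem_filter.mp hef).2
          have hein : e ∈ C.items := List.mem_of_mem_filter hef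
          rcases (hmemS p).mp hpm with hpi | ⟨e', he', hpe'⟩
          · have hs : pvSel pos e = true := (pvSel_iff pos e).mpr ⟨p, hpi, hpe⟩
            rw [hnotsel] at hs
            exact Bool.false_eq_true.mp hs
          · have he'i : e' ∈ C.items := List.mem_of_mem_filter he'
            have h5a : M.get? p = some e.1 := (h5 p e.1).mpr ⟨e, hein, rfl, hpe⟩
            have h5b : M.get? p = some e'.1 := (h5 p e'.1).mpr ⟨e', he'i, rfl, hpe'⟩
            rw [h5a] at h5b
            injection h5b with hkey
            have hee : e' = e := huniq e e' hein he'i hkey.symm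
            have hs : pvSel pos e = true := by
              rw [← hee]
              exact (List.mem_filter.mp he').2
            rw [hnotsel] at hs
            exact Bool.false_eq_true.mp hs
        · have : e = (n, (pvMS C.items pos, pvMF C.items n pos)) := by simpa using hen
          rw [this]
    · rw [if_neg hpm]
      rw [h5 p k]
      constructor
      · rintro ⟨e, he, rfl, hpe⟩
        have hnot : pvSel pos e = false := by
          rw [Bool.eq_false_iff]
          intro hsel
          exact hpm ((hmemS p).mpr (Or.inr ⟨e, List.mem_filter.mpr ⟨he, hsel⟩, hpe⟩))
        exact ⟨e, List.mem_append_left _ (List.mem_filter.mpr ⟨he, by simp [hnot]⟩), rfl, hpe⟩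
      · rintro ⟨e, he, rfl, hpe⟩
        rcases List.mem_append.mp he with hef | hen
        · exact ⟨e, List.mem_of_mem_filter hef, rfl, hpe⟩
        · exfalso
          have : e = (n, (pvMS C.items pos, pvMF C.items n pos)) := by simpa using hen
          rw [this] at hpe
          exact hpm hpe

lemma pvMain (l : List (List Int)) : ∀ (n : Int) a b, pvInv n a b →
    pvInv (n + l.length) ((PySem.List.enumerate l n).foldl pvStepA a)
      ((PySem.List.enumerate l n).foldl pvStepB b) := by
  induction l with
  | nil => intro n a b h; simpa using h
  | cons x t ih =>
      intro n a b h
      have h2 := ih (n + 1) _ _ (pvStep n x a b h)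
      simp only [pvEnum_cons, List.foldl_cons, List.length_cons]
      rw [show n + ((t.length + 1 : Nat) : Int) = (n + 1) + (t.length : Nat) by push_cast; ring]
      exact h2

-- ===== VERDICT (by name: the statement is the Claim_ definition above) =====
theorem extract_cc_id_spec : Claim_equal_extract_cc_id := by
  intro l _
  unfold Spec_extract_cc_id extract_cc_id extract_cc_id_alt
  have base : pvInv 0 (([] : List (PySem.Set Int)), ([] : List (List Int)))
      ((PySem.Dict.empty : PySem.Dict Int (PySem.Set Int × List Int)),
       (PySem.Dict.empty : PySem.Dict Int Int)) := by
    refine ⟨rfl, rfl, by simp [PySem.Dict.empty], by simp [PySem.Dict.empty], ?_⟩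
    intro p k
    simp [PySem.Dict.empty, PySem.Dict.get?]
  have h := pvMain l 0 _ _ base
  obtain ⟨-, h2, -, -, -⟩ := h
  rw [h2]
  simp [PySem.Dict.values, List.map_map]
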